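-- pv_equiv track=rewrite | github.com/SS-hj/coding_test | programmers/154540.py | solution
-- ===== SOURCE A (Python) =====
-- from collections import deque
--
-- dr = [-1,1,0,0]
--
-- dc = [0,0,-1,1]
--
-- def solution(maps):
--     n = len(maps)
--     m = len(maps[0])
--     for i in range(n):
--         maps[i] = list(maps[i])
--     res = []
--     visited = [[False]*m for _ in range(n)]
--
--     def bfs(sr,sc,d):
--         q = deque()
--         q.append((sr,sc))
--         while q:
--             r, c = q.popleft()
--             for i in range(4):
--                 nr = r + dr[i]
--                 nc = c + dc[i]
--                 if 0<=nr<n and 0<=nc<m and not visited[nr][nc]: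
--                     if maps[nr][nc] != "X":
--                         d += int(maps[nr][nc])
--                         visited[nr][nc] = True
--                         q.append((nr, nc))
--         return d
--
--     for i in range(n):
--         for j in range(m):
--             if not visited[i][j] and maps[i][j] != "X":
--                 visited[i][j] = True
--                 res.append(bfs(i,j,int(maps[i][j])))
--
--     return sorted(res) if res else [-1]
-- ===== SOURCE B (Python) =====
-- def solution(maps):
--     # Fixpoint label-propagation instead of BFS: grow each region by repeated
--     # full-grid sweeps until stable. Mirrors A's in-place row-to-list mutation.
--     n = len(maps)
--     m = len(maps[0])
--     for i in range(n):
--         maps[i] = list(maps[i])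
--     claimed = set()
--     res = []
--     for i in range(n):
--         for j in range(m):
--             if (i, j) in claimed or maps[i][j] == "X":
--                 continue
--             comp = {(i, j)}
--             for _ in range(n * m):
--                 changed = False
--                 for r in range(n):
--                     for c in range(m):
--                         if (r, c) not in comp and (r, c) not in claimed \
--                                 and maps[r][c] != "X" \
--                                 and ((r - 1, c) in comp or (r + 1, c) in comp
--                                      or (r, c - 1) in comp or (r, c + 1) in comp):
--                             comp.add((r, c))
--                             changed = True
--                 if not changed:
--                     break
--             claimed |= comp
--             res.append(sum(int(maps[r][c]) for r, c in comp))
--     return sorted(res) if res else [-1]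
-- ===== Notes on version B (the rewrite author's own statement) =====
-- stated objective: alternative
-- what changed: The per-seed BFS with a deque and dr/dc arrays is replaced by fixpoint label propagation: each region starts as its seed cell and is grown by repeated full-grid sweeps (adding any unclaimed non-X cell adjacent to the region) until a sweep changes nothing; equivalence is proved by showing both compute the reachability closure of the seed. Pre_ excludes inputs where A raises (empty maps, a row shorter than the first, or a cell in the first len(maps[0]) columns that is neither 'X' nor an ASCII digit).
import Mathlib
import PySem

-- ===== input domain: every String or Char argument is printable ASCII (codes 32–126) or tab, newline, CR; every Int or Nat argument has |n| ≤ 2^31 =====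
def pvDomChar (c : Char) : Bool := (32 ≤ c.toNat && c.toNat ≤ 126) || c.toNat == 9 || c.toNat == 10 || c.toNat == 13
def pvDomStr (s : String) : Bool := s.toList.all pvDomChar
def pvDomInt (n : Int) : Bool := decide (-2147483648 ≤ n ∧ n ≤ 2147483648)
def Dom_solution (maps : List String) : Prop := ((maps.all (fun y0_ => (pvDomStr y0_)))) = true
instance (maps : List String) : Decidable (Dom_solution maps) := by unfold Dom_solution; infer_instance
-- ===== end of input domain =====

-- B replaces A's per-seed BFS (deque, dr/dc arrays) by fixpoint label propagation: each region
-- is grown by repeated full-grid sweeps until stable; same return value, proved by showing both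
-- compute the reachability closure of the seed. A mutates its argument in place
-- (maps[i] = list(maps[i])) and B performs the same mutation; the equivalence proved here is
-- about the return value. (Fuel arguments are only totality guards, shown never exhausted.)

-- ===== PORT A =====
-- shared representation helpers (both ports read cells of the grid the same way)
def cellAt (g : List (List Char)) (r c : Int) : Char := (g.getD r.toNat []).getD c.toNat 'X'

-- int(maps[r][c]) (exact: PySem.Int.ofStr?; the .getD 0 is unreachable under Pre_)
def valAt (g : List (List Char)) (r c : Int) : Int :=
  (PySem.Int.ofStr? (String.ofList [cellAt g r c])).getD 0

-- A-side: dr/dc direction arrays and the body of the `for i in range(4)` loop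
def drA : List Int := [-1, 1, 0, 0]
def dcA : List Int := [0, 0, -1, 1]

def stepA (g : List (List Char)) (n m r c : Int)
    (st : Finset (Int × Int) × List (Int × Int) × Int) (i : Nat) :
    Finset (Int × Int) × List (Int × Int) × Int :=
  if 0 ≤ r + drA.getD i 0 ∧ r + drA.getD i 0 < n ∧ 0 ≤ c + dcA.getD i 0 ∧ c + dcA.getD i 0 < m ∧
      (r + drA.getD i 0, c + dcA.getD i 0) ∉ st.1 then
    if cellAt g (r + drA.getD i 0) (c + dcA.getD i 0) ≠ 'X' then
      (insert (r + drA.getD i 0, c + dcA.getD i 0) st.1,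
       st.2.1 ++ [(r + drA.getD i 0, c + dcA.getD i 0)],
       st.2.2 + valAt g (r + drA.getD i 0) (c + dcA.getD i 0))
    else st
  else st

-- the `while q:` queue loop of bfs (fuel = totality guard, never exhausted by the callers)
def bfsA (g : List (List Char)) (n m : Int) (fuel : Nat) (v : Finset (Int × Int))
    (q : List (Int × Int)) (d : Int) : Finset (Int × Int) × Int :=
  match fuel, q with
  | _, [] => (v, d)
  | 0, _ :: _ => (v, d)
  | Nat.succ fuel, (r, c) :: rest =>
    let st := (List.range 4).foldl (stepA g n m r c) (v, rest, d)
    bfsA g n m fuel st.1 st.2.1 st.2.2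

def solution (maps : List String) : List Int :=
  let n := maps.length
  let m := (maps.headD "").length
  let g := maps.map (fun s => s.toList)     -- maps[i] = list(maps[i])
  let fin := (List.range n).foldl (fun st (i : Nat) =>
    (List.range m).foldl (fun (st : Finset (Int × Int) × List Int) (j : Nat) =>
      if ((i : Int), (j : Int)) ∉ st.1 ∧ cellAt g i j ≠ 'X' then
        let r := bfsA g n m (n * m + 1) (insert ((i : Int), (j : Int)) st.1)
          [((i : Int), (j : Int))] (valAt g i j)
        (r.1, st.2 ++ [r.2])
      else st) st) ((∅ : Finset (Int × Int)), ([] : List Int))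
  if fin.2 = [] then [-1] else PySem.List.sorted fin.2 (fun x => x) false

-- ===== PORT B =====
-- the nested `for r in range(n): for c in range(m):` sweep, as the list of (r, c) in order
def pvPairsB (n m : Nat) : List (Int × Int) :=
  (List.range n).flatMap (fun r => (List.range m).map (fun c => ((r : Int), (c : Int))))

-- the body of the sweep: the python condition, in the same order
def stepS (g : List (List Char)) (cl : Finset (Int × Int)) (comp : Finset (Int × Int))
    (p : Int × Int) : Finset (Int × Int) :=
  if p ∉ comp ∧ p ∉ cl ∧ cellAt g p.1 p.2 ≠ 'X' ∧
      ((p.1 - 1, p.2) ∈ comp ∨ (p.1 + 1, p.2) ∈ comp ∨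
       (p.1, p.2 - 1) ∈ comp ∨ (p.1, p.2 + 1) ∈ comp) then
    insert p comp
  else comp

def sweepS (g : List (List Char)) (cl : Finset (Int × Int)) (n m : Nat)
    (comp : Finset (Int × Int)) : Finset (Int × Int) :=
  (pvPairsB n m).foldl (stepS g cl) comp

-- the `for _ in range(n*m)` loop with the changed-flag break: a sweep that adds nothing
-- leaves comp unchanged, so `not changed` is exactly `sweepS … comp = comp`
def satS (g : List (List Char)) (cl : Finset (Int × Int)) (n m : Nat) :
    Nat → Finset (Int × Int) → Finset (Int × Int)
  | 0, comp => comp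
  | Nat.succ fuel, comp =>
    let c' := sweepS g cl n m comp
    if c' = comp then comp else satS g cl n m fuel c'

def solution_alt (maps : List String) : List Int :=
  let n := maps.length
  let m := (maps.headD "").length
  let g := maps.map (fun s => s.toList)     -- maps[i] = list(maps[i])
  let fin := (List.range n).foldl (fun st (i : Nat) =>
    (List.range m).foldl (fun (st : Finset (Int × Int) × List Int) (j : Nat) =>
      if ((i : Int), (j : Int)) ∈ st.1 ∨ cellAt g i j = 'X' then st
      else
        let comp := satS g st.1 n m (n * m) {((i : Int), (j : Int))}
        (st.1 ∪ comp, st.2 ++ [∑ p ∈ comp, valAt g p.1 p.2])) st)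
    ((∅ : Finset (Int × Int)), ([] : List Int))
  if fin.2 = [] then [-1] else PySem.List.sorted fin.2 (fun x => x) false

-- ===== PRECONDITION & SPEC =====
-- Pre_ is exactly where the Python A returns: a non-empty maps, every row at least as long as
-- the first (else IndexError), and every cell in the first len(maps[0]) columns either 'X' or
-- an ASCII digit (else int(...) raises ValueError).
def Pre_solution (maps : List String) : Prop :=
  maps ≠ [] ∧ ∀ row ∈ maps, (maps.headD "").toList.length ≤ row.toList.length ∧
    ∀ j < (maps.headD "").toList.length,
      row.toList.getD j ' ' = 'X' ∨ ('0' ≤ row.toList.getD j ' ' ∧ row.toList.getD j ' ' ≤ '9')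
instance (maps : List String) : Decidable (Pre_solution maps) := by
  unfold Pre_solution; infer_instance
def pvWitness_solution : List String := ["X15", "2X3"]
def Spec_solution (maps : List String) (out : List Int) : Prop := out = solution_alt maps
instance (maps : List String) (out : List Int) : Decidable (Spec_solution maps out) := by
  unfold Spec_solution; infer_instance

-- ===== CLAIM (what is proved, stated in full; the proofs are below) =====
def Claim_equal_solution : Prop :=
  ∀ (maps : List String), Dom_solution maps → Pre_solution maps → Spec_solution maps (solution maps)

-- ===== LEMMAS AND PROOFS =====

-- admissible cell wrt an avoided set, the 4-neighbour list, reachability from a seed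
def pvAdm (g : List (List Char)) (n m : Int) (v : Finset (Int × Int)) (p : Int × Int) : Bool :=
  decide (0 ≤ p.1 ∧ p.1 < n ∧ 0 ≤ p.2 ∧ p.2 < m ∧ p ∉ v ∧ cellAt g p.1 p.2 ≠ 'X')

def pvNbrs (p : Int × Int) : List (Int × Int) :=
  [(p.1 - 1, p.2), (p.1 + 1, p.2), (p.1, p.2 - 1), (p.1, p.2 + 1)]

inductive pvReach (g : List (List Char)) (n m : Int) (cl : Finset (Int × Int)) (s : Int × Int) :
    Int × Int → Prop
  | refl : pvReach g n m cl s s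
  | tail {t p : Int × Int} : pvReach g n m cl s t → p ∈ pvNbrs t →
      pvAdm g n m cl p = true → pvReach g n m cl s p

theorem pv_reach_not_cl {g : List (List Char)} {n m : Int} {cl : Finset (Int × Int)}
    {s p : Int × Int} (hs : s ∉ cl) (h : pvReach g n m cl s p) : p ∉ cl := by
  cases h with
  | refl => exact hs
  | tail _ _ hadm => exact (of_decide_eq_true hadm).2.2.2.2.1

theorem pv_nbrs_symm {p t : Int × Int} : p ∈ pvNbrs t ↔ t ∈ pvNbrs p := by
  simp only [pvNbrs, List.mem_cons, List.not_mem_nil, or_false, Prod.ext_iff]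
  omega

-- A-side worklist machinery (fresh admissible neighbours, their sum, the 4-fold characterised)
def pvFresh (g : List (List Char)) (n m : Int) (v : Finset (Int × Int)) (x : Int × Int) :
    List (Int × Int) :=
  (pvNbrs x).filter (fun p => pvAdm g n m v p)

def pvSum (g : List (List Char)) (F : List (Int × Int)) : Int :=
  (F.map (fun p => valAt g p.1 p.2)).sum

theorem pvSum_cons (g : List (List Char)) (p : Int × Int) (l : List (Int × Int)) :
    pvSum g (p :: l) = valAt g p.1 p.2 + pvSum g l := by
  simp [pvSum]

theorem pvNbrs_nodup (x : Int × Int) : (pvNbrs x).Nodup := by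
  simp [pvNbrs, Prod.ext_iff]
  omega

theorem pvFresh_nodup (g : List (List Char)) (n m : Int) (v : Finset (Int × Int))
    (x : Int × Int) : (pvFresh g n m v x).Nodup :=
  (pvNbrs_nodup x).filter _

def pvCells (n m : Int) : Finset (Int × Int) :=
  (Finset.range n.toNat ×ˢ Finset.range m.toNat).image (fun p => ((p.1 : Int), (p.2 : Int)))

def pvMu (n m : Int) (v : Finset (Int × Int)) (q : List (Int × Int)) : Nat :=
  (pvCells n m \ v).card + q.length

theorem pv_mem_cells {n m : Int} {p : Int × Int}
    (h : 0 ≤ p.1 ∧ p.1 < n ∧ 0 ≤ p.2 ∧ p.2 < m) : p ∈ pvCells n m := by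
  rcases p with ⟨a, b⟩
  simp only [pvCells, Finset.mem_image, Finset.mem_product, Finset.mem_range]
  exact ⟨(a.toNat, b.toNat), ⟨by omega, by omega⟩, by simp; omega⟩

theorem pvFresh_mem {g : List (List Char)} {n m : Int} {v : Finset (Int × Int)}
    {x p : Int × Int} (h : p ∈ pvFresh g n m v x) : p ∈ pvCells n m ∧ p ∉ v := by
  have hadm := of_decide_eq_true ((List.mem_filter.mp h).2)
  exact ⟨pv_mem_cells ⟨hadm.1, hadm.2.1, hadm.2.2.1, hadm.2.2.2.1⟩, hadm.2.2.2.2.1⟩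

-- worklist step written over pvNbrs (proof-layer reformulation of A's 4-direction fold)
def pvStepW (g : List (List Char)) (n m : Int)
    (st : Finset (Int × Int) × List (Int × Int) × Int) (p : Int × Int) :
    Finset (Int × Int) × List (Int × Int) × Int :=
  if pvAdm g n m st.1 p then (insert p st.1, st.2.1 ++ [p], st.2.2 + valAt g p.1 p.2)
  else st

theorem pv_foldW_char (g : List (List Char)) (n m : Int) :
    ∀ (ps : List (Int × Int)), ps.Nodup →
      ∀ (v : Finset (Int × Int)) (q : List (Int × Int)) (d : Int),
      ps.foldl (pvStepW g n m) (v, q, d) =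
        (v ∪ (ps.filter (fun p => pvAdm g n m v p)).toFinset,
         q ++ ps.filter (fun p => pvAdm g n m v p),
         d + pvSum g (ps.filter (fun p => pvAdm g n m v p))) := by
  intro ps
  induction ps with
  | nil => intro _ v q d; simp [pvSum]
  | cons p ps ih =>
    intro hnd v q d
    obtain ⟨hp, hps⟩ := List.nodup_cons.mp hnd
    by_cases hA : pvAdm g n m v p = true
    · have hfc : ps.filter (fun x => pvAdm g n m (insert p v) x) =
          ps.filter (fun x => pvAdm g n m v x) := by
        apply List.filter_congr
        intro x hx
        have hxp : x ≠ p := fun hh => hp (hh ▸ hx)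
        simp [pvAdm, Finset.mem_insert, hxp]
      simp only [List.foldl_cons, pvStepW, hA, if_true]
      rw [ih hps (insert p v) (q ++ [p]) (d + valAt g p.1 p.2), hfc]
      simp only [List.filter_cons, hA, if_true, List.toFinset_cons, pvSum_cons]
      refine Prod.ext ?_ (Prod.ext ?_ ?_)
      · simp [Finset.insert_union, Finset.union_insert]
      · simp
      · dsimp only; ring
    · simp only [List.foldl_cons, pvStepW, hA, if_false, Bool.false_eq_true]
      rw [ih hps v q d]
      simp [hA]

theorem pv_bfsA_nil (g : List (List Char)) (n m : Int) (fuel : Nat) (v : Finset (Int × Int))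
    (d : Int) : bfsA g n m fuel v [] d = (v, d) := by
  cases fuel <;> rfl

theorem pv_bfsA_cons (g : List (List Char)) (n m : Int) (fuel : Nat) (v : Finset (Int × Int))
    (x : Int × Int) (rest : List (Int × Int)) (d : Int) :
    bfsA g n m (fuel + 1) v (x :: rest) d =
      bfsA g n m fuel (v ∪ (pvFresh g n m v x).toFinset) (rest ++ pvFresh g n m v x)
        (d + pvSum g (pvFresh g n m v x)) := by
  obtain ⟨r, c⟩ := x
  have hstep : ∀ st (i : Nat),
      stepA g n m r c st i = pvStepW g n m st (r + drA.getD i 0, c + dcA.getD i 0) := by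
    intro st i
    simp only [stepA, pvStepW]
    by_cases hB : pvAdm g n m st.1 (r + drA.getD i 0, c + dcA.getD i 0) = true
    · have hSix := of_decide_eq_true hB
      rw [if_pos (⟨hSix.1, hSix.2.1, hSix.2.2.1, hSix.2.2.2.1, hSix.2.2.2.2.1⟩ :
            0 ≤ r + drA.getD i 0 ∧ r + drA.getD i 0 < n ∧ 0 ≤ c + dcA.getD i 0 ∧
              c + dcA.getD i 0 < m ∧ (r + drA.getD i 0, c + dcA.getD i 0) ∉ st.1),
          if_pos hSix.2.2.2.2.2, if_pos hB]
    · rw [if_neg hB]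
      by_cases h1 : 0 ≤ r + drA.getD i 0 ∧ r + drA.getD i 0 < n ∧ 0 ≤ c + dcA.getD i 0 ∧
          c + dcA.getD i 0 < m ∧ (r + drA.getD i 0, c + dcA.getD i 0) ∉ st.1
      · have hX : ¬(cellAt g (r + drA.getD i 0) (c + dcA.getD i 0) ≠ 'X') := fun hx =>
          hB (decide_eq_true ⟨h1.1, h1.2.1, h1.2.2.1, h1.2.2.2.1, h1.2.2.2.2, hx⟩)
        rw [if_pos h1, if_neg hX]
      · rw [if_neg h1]
  have hfold : (List.range 4).foldl (stepA g n m r c) (v, rest, d) =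
      (pvNbrs (r, c)).foldl (pvStepW g n m) (v, rest, d) := by
    have hrange : List.range 4 = [0, 1, 2, 3] := by decide
    have e0 : drA.getD 0 0 = -1 := rfl
    have e1 : drA.getD 1 0 = 1 := rfl
    have e2 : drA.getD 2 0 = 0 := rfl
    have e3 : drA.getD 3 0 = 0 := rfl
    have f0 : dcA.getD 0 0 = 0 := rfl
    have f1 : dcA.getD 1 0 = 0 := rfl
    have f2 : dcA.getD 2 0 = -1 := rfl
    have f3 : dcA.getD 3 0 = 1 := rfl
    rw [hrange]
    simp only [List.foldl_cons, List.foldl_nil, hstep, e0, e1, e2, e3, f0, f1, f2, f3, pvNbrs,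
      add_zero]
    rw [show r + -1 = r - 1 by ring, show c + -1 = c - 1 by ring]
  show (let st := (List.range 4).foldl (stepA g n m r c) (v, rest, d)
        bfsA g n m fuel st.1 st.2.1 st.2.2) = _
  rw [hfold, pv_foldW_char g n m (pvNbrs (r, c)) (pvNbrs_nodup (r, c)) v rest d]
  rfl

theorem pv_mu_card (g : List (List Char)) (n m : Int) (v : Finset (Int × Int)) (x : Int × Int) :
    (pvCells n m \ (v ∪ (pvFresh g n m v x).toFinset)).card + (pvFresh g n m v x).length =
      (pvCells n m \ v).card := by
  have hsub : (pvFresh g n m v x).toFinset ⊆ pvCells n m \ v := by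
    intro p hp
    have := pvFresh_mem (List.mem_toFinset.mp hp)
    exact Finset.mem_sdiff.mpr this
  have h1 : pvCells n m \ (v ∪ (pvFresh g n m v x).toFinset) =
      (pvCells n m \ v) \ (pvFresh g n m v x).toFinset := by
    ext p; simp only [Finset.mem_sdiff, Finset.mem_union]; tauto
  have hle := Finset.card_le_card hsub
  have hinter : (pvFresh g n m v x).toFinset ∩ (pvCells n m \ v) = (pvFresh g n m v x).toFinset :=
    Finset.inter_eq_left.mpr hsub
  rw [h1, Finset.card_sdiff, hinter, List.toFinset_card_of_nodup (pvFresh_nodup g n m v x)]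
  rw [List.toFinset_card_of_nodup (pvFresh_nodup g n m v x)] at hle
  omega

theorem pv_mu_seed_le (N M : Nat) (v : Finset (Int × Int)) (p : Int × Int) :
    pvMu (N : Int) (M : Int) v [p] ≤ N * M + 1 := by
  have h1 : (pvCells (N : Int) (M : Int) \ v).card ≤ (pvCells (N : Int) (M : Int)).card :=
    Finset.card_le_card (Finset.sdiff_subset)
  have h2 : (pvCells (N : Int) (M : Int)).card ≤ N * M := by
    calc (pvCells (N : Int) (M : Int)).card
        ≤ (Finset.range (N : Int).toNat ×ˢ Finset.range (M : Int).toNat).card :=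
          Finset.card_image_le
      _ = (N : Int).toNat * (M : Int).toNat := by
          rw [Finset.card_product, Finset.card_range, Finset.card_range]
      _ = N * M := by simp
  simp only [pvMu, List.length_cons, List.length_nil]
  omega

theorem pv_sum_toFinset {g : List (List Char)} {F : List (Int × Int)} (h : F.Nodup) :
    pvSum g F = ∑ p ∈ F.toFinset, valAt g p.1 p.2 :=
  (List.sum_toFinset _ h).symm

-- the worklist invariant and postcondition
def pvInv (g : List (List Char)) (n m : Int) (cl : Finset (Int × Int)) (s : Int × Int)
    (v : Finset (Int × Int)) (q : List (Int × Int)) (d : Int) : Prop :=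
  insert s cl ⊆ v ∧
  (∀ p ∈ v, p ∉ cl → pvReach g n m cl s p) ∧
  (∀ x ∈ q, x ∈ v ∧ x ∉ cl) ∧
  d = ∑ p ∈ v \ cl, valAt g p.1 p.2 ∧
  (∀ t ∈ v, t ∉ cl → t ∉ q → ∀ p ∈ pvNbrs t, pvAdm g n m cl p = true → p ∈ v)

def pvPost (g : List (List Char)) (n m : Int) (cl : Finset (Int × Int)) (s : Int × Int)
    (v' : Finset (Int × Int)) (d' : Int) : Prop :=
  insert s cl ⊆ v' ∧
  (∀ p, p ∈ v' ↔ p ∈ cl ∨ pvReach g n m cl s p) ∧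
  d' = ∑ p ∈ v' \ cl, valAt g p.1 p.2

theorem pv_bfsA_run (g : List (List Char)) (n m : Int) (cl : Finset (Int × Int))
    (s : Int × Int) (hs : s ∉ cl) :
    ∀ (fuel : Nat) (v : Finset (Int × Int)) (q : List (Int × Int)) (d : Int),
      pvMu n m v q ≤ fuel → pvInv g n m cl s v q d →
      pvPost g n m cl s (bfsA g n m fuel v q d).1 (bfsA g n m fuel v q d).2 := by
  intro fuel
  induction fuel using Nat.strong_induction_on with
  | _ fuel IH =>
  intro v q d hk hinv
  obtain ⟨hseed, hsound, hq, hd, hclosed⟩ := hinv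
  match q with
  | [] =>
    rw [pv_bfsA_nil]
    refine ⟨hseed, fun p => ⟨?_, ?_⟩, hd⟩
    · intro hp
      by_cases hpc : p ∈ cl
      · exact Or.inl hpc
      · exact Or.inr (hsound p hp hpc)
    · rintro (hp | hp)
      · exact hseed (Finset.mem_insert_of_mem hp)
      · induction hp with
        | refl => exact hseed (Finset.mem_insert_self s cl)
        | tail hr hnb hadm ih =>
          exact hclosed _ ih (pv_reach_not_cl hs hr) (List.not_mem_nil) _ hnb hadm
  | x :: rest =>
    have hfuel1 : 1 ≤ fuel := by
      have : 1 ≤ pvMu n m v (x :: rest) := by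
        simp only [pvMu, List.length_cons]; omega
      omega
    obtain ⟨fuel0, rfl⟩ : ∃ f, fuel = f + 1 := ⟨fuel - 1, by omega⟩
    rw [pv_bfsA_cons]
    set F := pvFresh g n m v x with hF
    have hxv : x ∈ v ∧ x ∉ cl := hq x (List.mem_cons_self)
    have hclv : cl ⊆ v := fun p hp => hseed (Finset.mem_insert_of_mem hp)
    have hFadm : ∀ p ∈ F, pvAdm g n m v p = true := fun p hp => (List.mem_filter.mp hp).2
    have hFnb : ∀ p ∈ F, p ∈ pvNbrs x := fun p hp => (List.mem_filter.mp hp).1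
    have hFnotv : ∀ p ∈ F, p ∉ v := fun p hp => (of_decide_eq_true (hFadm p hp)).2.2.2.2.1
    have hFadmcl : ∀ p ∈ F, pvAdm g n m cl p = true := by
      intro p hp
      have h6 := of_decide_eq_true (hFadm p hp)
      exact decide_eq_true ⟨h6.1, h6.2.1, h6.2.2.1, h6.2.2.2.1,
        fun hc => h6.2.2.2.2.1 (hclv hc), h6.2.2.2.2.2⟩
    have hFreach : ∀ p ∈ F, pvReach g n m cl s p := fun p hp =>
      pvReach.tail (hsound x hxv.1 hxv.2) (hFnb p hp) (hFadmcl p hp)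
    have hmu : pvMu n m (v ∪ F.toFinset) (rest ++ F) + 1 = pvMu n m v (x :: rest) := by
      have := pv_mu_card g n m v x
      simp only [pvMu, List.length_append, List.length_cons, hF]
      omega
    have hsdiff : (v ∪ F.toFinset) \ cl = (v \ cl) ∪ F.toFinset := by
      ext p
      simp only [Finset.mem_sdiff, Finset.mem_union, List.mem_toFinset]
      constructor
      · rintro ⟨hv | hf, hc⟩
        · exact Or.inl ⟨hv, hc⟩
        · exact Or.inr hf
      · rintro (⟨hv, hc⟩ | hf)
        · exact ⟨Or.inl hv, hc⟩
        · exact ⟨Or.inr hf, fun hc => hFnotv p hf (hclv hc)⟩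
    have hdisj : Disjoint (v \ cl) F.toFinset := by
      rw [Finset.disjoint_right]
      intro p hp hp2
      exact hFnotv p (List.mem_toFinset.mp hp) (Finset.mem_sdiff.mp hp2).1
    refine IH fuel0 (by omega) _ _ _ (by omega)
      ⟨hseed.trans Finset.subset_union_left, ?_, ?_, ?_, ?_⟩
    · intro p hp hpc
      rcases Finset.mem_union.mp hp with hv | hf
      · exact hsound p hv hpc
      · exact hFreach p (List.mem_toFinset.mp hf)
    · intro y hy
      rcases List.mem_append.mp hy with hy | hy
      · have := hq y (List.mem_cons_of_mem x hy)
        exact ⟨Finset.mem_union_left _ this.1, this.2⟩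
      · refine ⟨Finset.mem_union_right _ (List.mem_toFinset.mpr hy), ?_⟩
        exact fun hc => hFnotv y hy (hclv hc)
    · rw [hd, hsdiff, Finset.sum_union hdisj, pv_sum_toFinset (pvFresh_nodup g n m v x)]
    · intro t ht htc htq p hnb hadm
      rcases Finset.mem_union.mp ht with htv | htf
      · by_cases htx : t = x
        · subst htx
          by_cases hpv : p ∈ v
          · exact Finset.mem_union_left _ hpv
          · have h6 := of_decide_eq_true hadm
            have : pvAdm g n m v p = true :=
              decide_eq_true ⟨h6.1, h6.2.1, h6.2.2.1, h6.2.2.2.1, hpv, h6.2.2.2.2.2⟩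
            exact Finset.mem_union_right _
              (List.mem_toFinset.mpr (List.mem_filter.mpr ⟨hnb, this⟩))
        · have htrest : t ∉ rest := fun hr => htq (List.mem_append.mpr (Or.inl hr))
          have : t ∉ x :: rest := by
            simp only [List.mem_cons, not_or]; exact ⟨htx, htrest⟩
          exact Finset.mem_union_left _ (hclosed t htv htc this p hnb hadm)
      · exact absurd (List.mem_append.mpr (Or.inr (List.mem_toFinset.mp htf))) htq

-- B-side: generic fold lemmas, pairs membership, saturation characterised
theorem pv_foldl_inv {α : Type} {P : Finset (Int × Int) → Prop}
    (f : Finset (Int × Int) → α → Finset (Int × Int)) :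
    ∀ (l : List α) (init : Finset (Int × Int)),
      (∀ st a, a ∈ l → P st → P (f st a)) → P init → P (l.foldl f init) := by
  intro l
  induction l with
  | nil => intro init _ h; exact h
  | cons a l ih =>
    intro init hstep hinit
    exact ih (f init a) (fun st b hb => hstep st b (List.mem_cons_of_mem a hb))
      (hstep init a (List.mem_cons_self) hinit)

theorem pv_foldl_mono {α : Type} (f : Finset (Int × Int) → α → Finset (Int × Int))
    (hm : ∀ st a, st ⊆ f st a) :
    ∀ (l : List α) (init : Finset (Int × Int)), init ⊆ l.foldl f init := by
  intro l
  induction l with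
  | nil => intro init; exact Finset.Subset.refl _
  | cons a l ih => intro init; exact (hm init a).trans (ih (f init a))

theorem pv_foldl_hits (f : Finset (Int × Int) → (Int × Int) → Finset (Int × Int))
    (hm : ∀ st a, st ⊆ f st a) (comp : Finset (Int × Int)) (p : Int × Int)
    (hp : ∀ st, comp ⊆ st → p ∈ f st p) :
    ∀ (l : List (Int × Int)) (st : Finset (Int × Int)),
      p ∈ l → comp ⊆ st → p ∈ l.foldl f st := by
  intro l
  induction l with
  | nil => intro st h; exact absurd h (List.not_mem_nil)
  | cons a l ih =>
    intro st hmem hsub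
    rcases List.mem_cons.mp hmem with rfl | hmem
    · exact pv_foldl_mono f hm l (f st p) (hp st hsub)
    · exact ih (f st a) hmem (hsub.trans (hm st a))

theorem pv_mem_pairs {n m : Nat} {p : Int × Int} :
    p ∈ pvPairsB n m ↔ 0 ≤ p.1 ∧ p.1 < (n : Int) ∧ 0 ≤ p.2 ∧ p.2 < (m : Int) := by
  rcases p with ⟨a, b⟩
  constructor
  · intro h
    simp [pvPairsB] at h
    obtain ⟨⟨r, hr, rfl⟩, ⟨c, hc, rfl⟩⟩ := h
    refine ⟨?_, ?_, ?_, ?_⟩ <;> omega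
  · rintro ⟨h1, h2, h3, h4⟩
    simp [pvPairsB]
    exact ⟨⟨a.toNat, by omega, by omega⟩, ⟨b.toNat, by omega, by omega⟩⟩

theorem pv_pairs_length (n m : Nat) : (pvPairsB n m).length = n * m := by
  unfold pvPairsB
  rw [List.length_flatMap]
  simp

def pvCellsB (n m : Nat) : Finset (Int × Int) := (pvPairsB n m).toFinset

theorem pv_cellsB_card (n m : Nat) : (pvCellsB n m).card ≤ n * m := by
  calc (pvCellsB n m).card ≤ (pvPairsB n m).length := List.toFinset_card_le _
    _ = n * m := pv_pairs_length n m

theorem pv_stepS_mono (g : List (List Char)) (cl : Finset (Int × Int)) :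
    ∀ (st : Finset (Int × Int)) (a : Int × Int), st ⊆ stepS g cl st a := by
  intro st a
  unfold stepS
  split_ifs with h
  · exact Finset.subset_insert _ _
  · exact Finset.Subset.refl _

theorem pv_sweep_mono (g : List (List Char)) (cl : Finset (Int × Int)) (n m : Nat)
    (comp : Finset (Int × Int)) : comp ⊆ sweepS g cl n m comp :=
  pv_foldl_mono _ (pv_stepS_mono g cl) _ _

theorem pv_satS_mono (g : List (List Char)) (cl : Finset (Int × Int)) (n m : Nat) :
    ∀ (fuel : Nat) (comp : Finset (Int × Int)), comp ⊆ satS g cl n m fuel comp := by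
  intro fuel
  induction fuel with
  | zero => intro comp; exact Finset.Subset.refl _
  | succ f ih =>
    intro comp
    show comp ⊆ (let c' := sweepS g cl n m comp; if c' = comp then comp else satS g cl n m f c')
    dsimp only
    split_ifs with h
    · exact Finset.Subset.refl _
    · exact (pv_sweep_mono g cl n m comp).trans (ih _)

theorem pv_sweep_sub (g : List (List Char)) (cl : Finset (Int × Int)) (n m : Nat)
    (comp : Finset (Int × Int)) : sweepS g cl n m comp ⊆ comp ∪ pvCellsB n m := by
  refine pv_foldl_inv (P := fun st => st ⊆ comp ∪ pvCellsB n m) _ _ _ ?_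
    Finset.subset_union_left
  intro st a ha hst
  unfold stepS
  split_ifs with h
  · exact Finset.insert_subset
      (Finset.mem_union_right _ (List.mem_toFinset.mpr ha)) hst
  · exact hst

theorem pv_satS_fix (g : List (List Char)) (cl : Finset (Int × Int)) (n m : Nat) :
    ∀ (fuel : Nat) (comp : Finset (Int × Int)), comp ⊆ pvCellsB n m →
      (pvCellsB n m).card ≤ fuel + comp.card →
      sweepS g cl n m (satS g cl n m fuel comp) = satS g cl n m fuel comp := by
  intro fuel
  induction fuel with
  | zero =>
    intro comp hsub hcard
    have hcomp : comp = pvCellsB n m :=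
      Finset.eq_of_subset_of_card_le hsub (by omega)
    show sweepS g cl n m comp = comp
    refine Finset.Subset.antisymm ?_ (pv_sweep_mono g cl n m comp)
    refine (pv_sweep_sub g cl n m comp).trans ?_
    rw [hcomp, Finset.union_self]
  | succ f ih =>
    intro comp hsub hcard
    show sweepS g cl n m (let c' := sweepS g cl n m comp;
        if c' = comp then comp else satS g cl n m f c') =
      (let c' := sweepS g cl n m comp; if c' = comp then comp else satS g cl n m f c')
    dsimp only
    split_ifs with hfix
    · exact hfix
    · have hss : comp ⊂ sweepS g cl n m comp :=
        Finset.ssubset_iff_subset_ne.mpr ⟨pv_sweep_mono g cl n m comp, fun h => hfix h.symm⟩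
      have hlt := Finset.card_lt_card hss
      exact ih _ ((pv_sweep_sub g cl n m comp).trans
        (Finset.union_subset hsub (Finset.Subset.refl _))) (by omega)

-- soundness: everything the saturation adds is reachable from the seed
theorem pv_sweep_sound (g : List (List Char)) (cl : Finset (Int × Int)) (n m : Nat)
    (s : Int × Int) (comp : Finset (Int × Int))
    (h : ∀ x ∈ comp, pvReach g (n : Int) (m : Int) cl s x) :
    ∀ x ∈ sweepS g cl n m comp, pvReach g (n : Int) (m : Int) cl s x := by
  refine pv_foldl_inv (P := fun st => ∀ x ∈ st, pvReach g (n : Int) (m : Int) cl s x) _ _ _ ?_ h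
  intro st a ha hst
  unfold stepS
  split_ifs with hc
  · intro x hx
    rcases Finset.mem_insert.mp hx with rfl | hx
    · obtain ⟨hnc, hncl, hX, hdisj⟩ := hc
      have hinb := pv_mem_pairs.mp ha
      have hadm : pvAdm g (n : Int) (m : Int) cl x = true :=
        decide_eq_true ⟨hinb.1, hinb.2.1, hinb.2.2.1, hinb.2.2.2, hncl, hX⟩
      rcases hdisj with ht | ht | ht | ht
      all_goals {
        refine pvReach.tail (hst _ ht) ?_ hadm
        simp [pvNbrs]
      }
    · exact hst x hx
  · exact hst

theorem pv_satS_sound (g : List (List Char)) (cl : Finset (Int × Int)) (n m : Nat)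
    (s : Int × Int) :
    ∀ (fuel : Nat) (comp : Finset (Int × Int)),
      (∀ x ∈ comp, pvReach g (n : Int) (m : Int) cl s x) →
      ∀ x ∈ satS g cl n m fuel comp, pvReach g (n : Int) (m : Int) cl s x := by
  intro fuel
  induction fuel with
  | zero => intro comp h; exact h
  | succ f ih =>
    intro comp h
    show ∀ x ∈ (let c' := sweepS g cl n m comp;
        if c' = comp then comp else satS g cl n m f c'), _
    dsimp only
    split_ifs with hfix
    · exact h
    · exact ih _ (pv_sweep_sound g cl n m s comp h)

-- completeness: a fixed point of the sweep is closed under admissible adjacency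
theorem pv_closed_of_fix (g : List (List Char)) (cl : Finset (Int × Int)) (n m : Nat)
    (comp : Finset (Int × Int)) (hfix : sweepS g cl n m comp = comp) :
    ∀ t ∈ comp, ∀ p ∈ pvNbrs t, pvAdm g (n : Int) (m : Int) cl p = true → p ∈ comp := by
  intro t ht p hnb hadm
  have h6 := of_decide_eq_true hadm
  have hpairs : p ∈ pvPairsB n m := pv_mem_pairs.mpr ⟨h6.1, h6.2.1, h6.2.2.1, h6.2.2.2.1⟩
  have htp : t ∈ pvNbrs p := pv_nbrs_symm.mp hnb
  have hdisj : (p.1 - 1, p.2) ∈ comp ∨ (p.1 + 1, p.2) ∈ comp ∨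
      (p.1, p.2 - 1) ∈ comp ∨ (p.1, p.2 + 1) ∈ comp := by
    simp only [pvNbrs, List.mem_cons, List.not_mem_nil, or_false] at htp
    rcases htp with rfl | rfl | rfl | rfl
    · exact Or.inl ht
    · exact Or.inr (Or.inl ht)
    · exact Or.inr (Or.inr (Or.inl ht))
    · exact Or.inr (Or.inr (Or.inr ht))
  have := pv_foldl_hits (stepS g cl) (pv_stepS_mono g cl) comp p ?_ (pvPairsB n m) comp
    hpairs (Finset.Subset.refl _)
  · exact hfix ▸ this
  · intro st hsub
    by_cases hps : p ∈ st
    · unfold stepS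
      split_ifs with h
      · exact Finset.mem_insert_self _ _
      · exact hps
    · unfold stepS
      rw [if_pos]
      · exact Finset.mem_insert_self _ _
      · refine ⟨hps, h6.2.2.2.2.1, h6.2.2.2.2.2, ?_⟩
        rcases hdisj with h | h | h | h
        · exact Or.inl (hsub h)
        · exact Or.inr (Or.inl (hsub h))
        · exact Or.inr (Or.inr (Or.inl (hsub h)))
        · exact Or.inr (Or.inr (Or.inr (hsub h)))

-- the saturation from the seed computes exactly the reachable set
theorem pv_satS_char (g : List (List Char)) (cl : Finset (Int × Int)) (n m : Nat)
    (s : Int × Int) (hinb : 0 ≤ s.1 ∧ s.1 < (n : Int) ∧ 0 ≤ s.2 ∧ s.2 < (m : Int)) :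
    ∀ p, p ∈ satS g cl n m (n * m) {s} ↔ pvReach g (n : Int) (m : Int) cl s p := by
  have hspairs : s ∈ pvPairsB n m := pv_mem_pairs.mpr hinb
  have hscells : ({s} : Finset (Int × Int)) ⊆ pvCellsB n m := by
    intro x hx
    rw [Finset.mem_singleton.mp hx]
    exact List.mem_toFinset.mpr hspairs
  have hcard : (pvCellsB n m).card ≤ n * m + ({s} : Finset (Int × Int)).card := by
    have := pv_cellsB_card n m
    simp only [Finset.card_singleton]
    omega
  have hfix := pv_satS_fix g cl n m (n * m) {s} hscells hcard
  intro p
  constructor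
  · exact pv_satS_sound g cl n m s (n * m) {s}
      (fun x hx => by rw [Finset.mem_singleton.mp hx]; exact pvReach.refl) p
  · intro hr
    induction hr with
    | refl => exact pv_satS_mono g cl n m (n * m) {s} (Finset.mem_singleton_self s)
    | tail hr hnb hadm ih => exact pv_closed_of_fix g cl n m _ hfix _ ih _ hnb hadm

-- per-cell equality of the two outer-loop bodies
theorem pv_cell_eq (g : List (List Char)) (N M : Nat) (st : Finset (Int × Int) × List Int)
    (i j : Nat) (hi : i < N) (hj : j < M) :
    (if ((i : Int), (j : Int)) ∉ st.1 ∧ cellAt g i j ≠ 'X' then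
       let r := bfsA g N M (N * M + 1) (insert ((i : Int), (j : Int)) st.1)
         [((i : Int), (j : Int))] (valAt g i j)
       (r.1, st.2 ++ [r.2])
     else st)
    = (if ((i : Int), (j : Int)) ∈ st.1 ∨ cellAt g i j = 'X' then st
       else
         let comp := satS g st.1 N M (N * M) {((i : Int), (j : Int))}
         (st.1 ∪ comp, st.2 ++ [∑ p ∈ comp, valAt g p.1 p.2])) := by
  by_cases h1 : ((i : Int), (j : Int)) ∈ st.1
  · simp [h1]
  · by_cases h2 : cellAt g i j = 'X'
    · simp [h1, h2]
    · rw [if_pos ⟨h1, h2⟩, if_neg (by simp [h1, h2])]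
      set s : Int × Int := ((i : Int), (j : Int)) with hsdef
      set cl := st.1 with hcl
      have hinb : 0 ≤ s.1 ∧ s.1 < (N : Int) ∧ 0 ≤ s.2 ∧ s.2 < (M : Int) := by
        refine ⟨by simp [hsdef], by simp [hsdef]; exact_mod_cast hi,
          by simp [hsdef], by simp [hsdef]; exact_mod_cast hj⟩
      have hsingle : insert s cl \ cl = {s} := by
        ext p
        simp only [Finset.mem_sdiff, Finset.mem_insert, Finset.mem_singleton]
        constructor
        · rintro ⟨rfl | hp, hc⟩
          · rfl
          · exact absurd hp hc
        · rintro rfl; exact ⟨Or.inl rfl, h1⟩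
      have hinv : pvInv g (N : Int) (M : Int) cl s (insert s cl) [s] (valAt g i j) := by
        refine ⟨Finset.Subset.refl _, ?_, ?_, ?_, ?_⟩
        · intro p hp hpc
          rcases Finset.mem_insert.mp hp with rfl | hp
          · exact pvReach.refl
          · exact absurd hp hpc
        · intro x hx
          rcases List.mem_cons.mp hx with rfl | hx
          · exact ⟨Finset.mem_insert_self _ _, h1⟩
          · exact absurd hx (List.not_mem_nil)
        · rw [hsingle, Finset.sum_singleton]
        · intro t ht htc htq p hnb hadm
          rcases Finset.mem_insert.mp ht with rfl | ht
          · exact absurd List.mem_cons_self htq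
          · exact absurd ht htc
      have hpost := pv_bfsA_run g (N : Int) (M : Int) cl s h1 (N * M + 1)
        (insert s cl) [s] (valAt g i j) (pv_mu_seed_le N M (insert s cl) s) hinv
      obtain ⟨hseed, hmem, hsum⟩ := hpost
      set r := bfsA g (N : Int) (M : Int) (N * M + 1) (insert s cl) [s] (valAt g i j) with hr
      have hchar := pv_satS_char g cl N M s hinb
      set C := satS g cl N M (N * M) {s} with hC
      have hset : r.1 = cl ∪ C := by
        ext p
        rw [hmem p, Finset.mem_union, hchar p]
      have hCnotcl : ∀ p ∈ C, p ∉ cl := fun p hp => pv_reach_not_cl h1 ((hchar p).mp hp)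
      have hsdC : r.1 \ cl = C := by
        rw [hset]
        ext p
        simp only [Finset.mem_sdiff, Finset.mem_union]
        constructor
        · rintro ⟨hcl | hc, hnc⟩
          · exact absurd hcl hnc
          · exact hc
        · intro hp; exact ⟨Or.inr hp, hCnotcl p hp⟩
      have hval : r.2 = ∑ p ∈ C, valAt g p.1 p.2 := by rw [hsum, hsdC]
      dsimp only
      rw [hset, hval]

-- fold congruence over the ranges
theorem pv_foldl_congr {α β : Type} (f f' : β → α → β) (l : List α)
    (h : ∀ st a, a ∈ l → f st a = f' st a) :
    ∀ init, l.foldl f init = l.foldl f' init := by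
  induction l with
  | nil => intro init; rfl
  | cons a l ih =>
    intro init
    rw [List.foldl_cons, List.foldl_cons, h init a (List.mem_cons_self)]
    exact ih (fun st b hb => h st b (List.mem_cons_of_mem a hb)) _

theorem pv_solution_eq (maps : List String) : solution maps = solution_alt maps := by
  unfold solution solution_alt
  dsimp only
  rw [pv_foldl_congr _ _ _ (fun st i hi =>
    pv_foldl_congr _ _ _ (fun st' j hj =>
      pv_cell_eq (maps.map (fun s => s.toList)) maps.length (maps.headD "").length st' i j
        (List.mem_range.mp hi) (List.mem_range.mp hj)) st)]

-- ===== VERDICT (by name: the statement is the Claim_ definition above) =====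
theorem solution_spec : Claim_equal_solution := by
  intro maps _ _
  unfold Spec_solution
  exact pv_solution_eq maps
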